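-- pv_equiv track=rewrite | github.com/altoid/leetcode | py/rob_bank_2100.py | solution
-- ===== SOURCE A (Python) =====
-- def solution(security, time):
--     if time == 0:
--         return [x for x in range(len(security))]
--
--     predecessors = [0] * len(security)
--     for i in range(1, len(security)):
--         if security[i - 1] >= security[i]:
--             predecessors[i] = predecessors[i - 1] + 1
--         else:
--             predecessors[i] = 0
--
--     successors = [0] * len(security)
--     for i in range(-2, -(len(security) + 1), -1):
--         if security[i + 1] >= security[i]:
--             successors[i] = successors[i + 1] + 1
--         else:
--             successors[i] = 0
--
--     result = []
--     for i in range(len(security)):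
--         if predecessors[i] >= time and successors[i] >= time:
--             result.append(i)
--
--     return result
-- ===== SOURCE B (Python) =====
-- def solution(security, time):
--     n = len(security)
--
--     def ok(i):
--         return (0 <= i - time and i + time <= n - 1
--                 and all(security[j - 1] >= security[j] for j in range(i - time + 1, i + 1))
--                 and all(security[j] <= security[j + 1] for j in range(i, i + time)))
--
--     return [i for i in range(n) if ok(i)]
-- ===== Notes on version B (the rewrite author's own statement) =====
-- stated objective: simpler
-- what changed: Replaced A's two prefix/suffix DP run-length arrays and the time==0 special case by a direct per-index check of the two windows (backward non-increasing, forward non-decreasing), with empty windows passing naturally.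
import Mathlib
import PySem

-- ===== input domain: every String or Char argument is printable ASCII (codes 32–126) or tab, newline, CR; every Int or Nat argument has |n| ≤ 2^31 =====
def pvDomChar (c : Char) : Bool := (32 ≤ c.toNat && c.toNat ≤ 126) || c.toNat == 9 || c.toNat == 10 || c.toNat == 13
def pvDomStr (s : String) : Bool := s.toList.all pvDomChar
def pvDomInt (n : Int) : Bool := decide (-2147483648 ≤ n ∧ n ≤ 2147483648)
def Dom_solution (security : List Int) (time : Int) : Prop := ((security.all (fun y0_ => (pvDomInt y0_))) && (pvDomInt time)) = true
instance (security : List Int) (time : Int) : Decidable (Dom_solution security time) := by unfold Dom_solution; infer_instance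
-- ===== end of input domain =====

-- B drops A's two DP arrays and time==0 special case: each index directly checks its two
-- windows (backward non-increasing, forward non-decreasing); objective: simpler.

-- ===== PORT A =====
def solution (security : List Int) (time : Int) : List Int :=
  if time = 0 then
    PySem.List.pyRange 0 (security.length : Int) 1
  else
    let n : Int := security.length
    let predecessors : List Int := List.replicate security.length 0
    let predecessors := (PySem.List.pyRange 1 n 1).foldl
      (fun pred i =>
        if PySem.List.pyGetD security (i - 1) 0 ≥ PySem.List.pyGetD security i 0 then
          PySem.List.pySetD pred i (PySem.List.pyGetD pred (i - 1) 0 + 1)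
        else
          PySem.List.pySetD pred i 0) predecessors
    let successors : List Int := List.replicate security.length 0
    let successors := (PySem.List.pyRange (-2) (-(n + 1)) (-1)).foldl
      (fun succ i =>
        if PySem.List.pyGetD security (i + 1) 0 ≥ PySem.List.pyGetD security i 0 then
          PySem.List.pySetD succ i (PySem.List.pyGetD succ (i + 1) 0 + 1)
        else
          PySem.List.pySetD succ i 0) successors
    (PySem.List.pyRange 0 n 1).foldl
      (fun result i =>
        if PySem.List.pyGetD predecessors i 0 ≥ time ∧ PySem.List.pyGetD successors i 0 ≥ time then
          result ++ [i]
        else result) []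

-- ===== PORT B =====
def solutionAltOk (security : List Int) (n time i : Int) : Bool :=
  decide (0 ≤ i - time) && decide (i + time ≤ n - 1)
  && (PySem.List.pyRange (i - time + 1) (i + 1) 1).all
       (fun j => decide (PySem.List.pyGetD security (j - 1) 0 ≥ PySem.List.pyGetD security j 0))
  && (PySem.List.pyRange i (i + time) 1).all
       (fun j => decide (PySem.List.pyGetD security j 0 ≤ PySem.List.pyGetD security (j + 1) 0))

def solution_alt (security : List Int) (time : Int) : List Int :=
  let n : Int := security.length
  (PySem.List.pyRange 0 n 1).filter (solutionAltOk security n time)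

-- ===== PRECONDITION & SPEC =====
def Spec_solution (security : List Int) (time : Int) (out : List Int) : Prop := out = solution_alt security time
instance (security : List Int) (time : Int) (out : List Int) : Decidable (Spec_solution security time out) := by unfold Spec_solution; infer_instance

-- ===== CLAIM (what is proved, stated in full; the proofs are below) =====
def Claim_equal_solution : Prop := ∀ (security : List Int) (time : Int), Dom_solution security time → Spec_solution security time (solution security time)

-- ===== LEMMAS AND PROOFS =====

/-- value A's `predecessors[i]` ends up holding -/
def predVal (sec : List Int) : Nat → Int
  | 0 => 0
  | i + 1 => if sec.getD i 0 ≥ sec.getD (i + 1) 0 then predVal sec i + 1 else 0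

/-- value A's `successors[i]` ends up holding -/
def succVal (sec : List Int) (i : Nat) : Int :=
  if _ : i + 1 < sec.length then
    (if sec.getD (i + 1) 0 ≥ sec.getD i 0 then succVal sec (i + 1) + 1 else 0)
  else 0
termination_by sec.length - i

theorem predVal_nonneg (sec : List Int) (i : Nat) : 0 ≤ predVal sec i := by
  induction i with
  | zero => simp [predVal]
  | succ m ih => rw [predVal]; split_ifs <;> omega

theorem succVal_nonneg (sec : List Int) (i : Nat) : 0 ≤ succVal sec i := by
  fun_induction succVal sec i with
  | case1 => omega
  | case2 => omega
  | case3 => omega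

theorem predVal_ge (sec : List Int) (t i : Nat) :
    (t : Int) ≤ predVal sec i ↔
      t ≤ i ∧ ∀ k : Nat, k < t → sec.getD (i - k) 0 ≤ sec.getD (i - k - 1) 0 := by
  induction t generalizing i with
  | zero => simpa using predVal_nonneg sec i
  | succ t ih =>
    cases i with
    | zero =>
      have := predVal_nonneg sec 0
      simp only [predVal]
      constructor
      · intro h; omega
      · rintro ⟨h, _⟩; omega
    | succ m =>
      rw [predVal]
      split_ifs with hc
      · have hiff := ih m
        constructor
        · intro h
          have h' : (t : Int) ≤ predVal sec m := by omega
          obtain ⟨h1, h2⟩ := hiff.mp h'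
          refine ⟨by omega, ?_⟩
          intro k hk
          cases k with
          | zero => simpa using hc
          | succ k' =>
            have := h2 k' (by omega)
            have e1 : m + 1 - (k' + 1) = m - k' := by omega
            rw [e1]
            exact this
        · rintro ⟨h1, h2⟩
          have h' : (t : Int) ≤ predVal sec m := by
            apply hiff.mpr
            refine ⟨by omega, ?_⟩
            intro k hk
            have := h2 (k + 1) (by omega)
            have e1 : m + 1 - (k + 1) = m - k := by omega
            rwa [e1] at this
          omega
      · constructor
        · intro h; omega
        · rintro ⟨h1, h2⟩
          have : sec.getD (m + 1) 0 ≤ sec.getD m 0 := h2 0 (by omega)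
          exact (hc this).elim

theorem succVal_ge (sec : List Int) (t i : Nat) (hi : i < sec.length) :
    (t : Int) ≤ succVal sec i ↔
      i + t < sec.length ∧ ∀ k : Nat, k < t → sec.getD (i + k) 0 ≤ sec.getD (i + k + 1) 0 := by
  induction t generalizing i with
  | zero =>
    have := succVal_nonneg sec i
    constructor
    · intro _; exact ⟨by omega, by omega⟩
    · intro _; omega
  | succ t ih =>
    rw [succVal]
    split_ifs with h hc
    · have hiff := ih (i + 1) h
      constructor
      · intro hle
        have h' : (t : Int) ≤ succVal sec (i + 1) := by omega
        obtain ⟨h1, h2⟩ := hiff.mp h'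
        refine ⟨by omega, ?_⟩
        intro k hk
        cases k with
        | zero => simpa using hc
        | succ k' =>
          have := h2 k' (by omega)
          have e1 : i + 1 + k' = i + (k' + 1) := by omega
          rwa [e1] at this
      · rintro ⟨h1, h2⟩
        have h' : (t : Int) ≤ succVal sec (i + 1) := by
          apply hiff.mpr
          refine ⟨by omega, ?_⟩
          intro k hk
          have := h2 (k + 1) (by omega)
          have e1 : i + (k + 1) = i + 1 + k := by omega
          rwa [e1] at this
        omega
    · constructor
      · intro hle; omega
      · rintro ⟨h1, h2⟩
        have : sec.getD i 0 ≤ sec.getD (i + 1) 0 := h2 0 (by omega)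
        exact (hc this).elim
    · constructor
      · intro hle; omega
      · rintro ⟨h1, h2⟩; omega

theorem pyGetD_neg' (xs : List Int) (i d : Int) (h1 : -(xs.length : Int) ≤ i) (h2 : i < 0) :
    PySem.List.pyGetD xs i d = xs.getD ((xs.length : Int) + i).toNat d := by
  rw [PySem.List.pyGetD, PySem.List.pyGet?, PySem.List.pyIdx?]
  rw [if_neg (by omega), if_pos h1]
  have : xs.length - (-i).toNat = ((xs.length : Int) + i).toNat := by omega
  rw [this]
  simp [List.getD_eq_getElem?_getD]

theorem pySetD_neg' (xs : List Int) (i v : Int) (h1 : -(xs.length : Int) ≤ i) (h2 : i < 0) :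
    PySem.List.pySetD xs i v = xs.set ((xs.length : Int) + i).toNat v := by
  rw [PySem.List.pySetD, PySem.List.pySet?, PySem.List.pyIdx?]
  rw [if_neg (by omega), if_pos h1]
  have : xs.length - (-i).toNat = ((xs.length : Int) + i).toNat := by omega
  rw [this]
  rfl

theorem pred_fold (sec : List Int) (a : Int) (P : List Int)
    (hlen : P.length = sec.length) (ha : 1 ≤ a)
    (hP : ∀ k : Nat, (k : Int) < a → P.getD k 0 = predVal sec k) :
    ∀ k : Nat, k < sec.length →
      ((PySem.List.pyRange a (sec.length : Int) 1).foldl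
        (fun pred i =>
          if PySem.List.pyGetD sec (i - 1) 0 ≥ PySem.List.pyGetD sec i 0 then
            PySem.List.pySetD pred i (PySem.List.pyGetD pred (i - 1) 0 + 1)
          else
            PySem.List.pySetD pred i 0) P).getD k 0
        = if (k : Int) < a then P.getD k 0 else predVal sec k := by
  by_cases hcase : (sec.length : Int) ≤ a
  · rw [PySem.List.pyRange_one_eq_nil hcase]
    intro k hk
    rw [List.foldl_nil, if_pos (by omega)]
  · push Not at hcase
    rw [PySem.List.pyRange_one_cons hcase, List.foldl_cons]
    -- the updated array
    have hm : a.toNat = (a - 1).toNat + 1 := by omega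
    set m := (a - 1).toNat with hmdef
    have hga : PySem.List.pyGetD sec a 0 = sec.getD (m + 1) 0 := by
      rw [PySem.List.pyGetD_of_nonneg sec 0 (by omega), show a.toNat = m + 1 by omega]
    have hga1 : PySem.List.pyGetD sec (a - 1) 0 = sec.getD m 0 := by
      rw [PySem.List.pyGetD_of_nonneg sec 0 (by omega)]
    have hgp1 : PySem.List.pyGetD P (a - 1) 0 = predVal sec m := by
      rw [PySem.List.pyGetD_of_nonneg P 0 (by omega)]
      exact hP m (by omega)
    set P' : List Int :=
      (if PySem.List.pyGetD sec (a - 1) 0 ≥ PySem.List.pyGetD sec a 0 then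
        PySem.List.pySetD P a (PySem.List.pyGetD P (a - 1) 0 + 1)
      else
        PySem.List.pySetD P a 0) with hP'def
    have hP'eq : P' = P.set a.toNat (predVal sec (a.toNat)) := by
      rw [hP'def, hga, hga1, hgp1, hm]
      rw [predVal]
      split_ifs with h
      · rw [PySem.List.pySetD_of_nonneg _ _ (by omega : (0:Int) ≤ a), hm]
      · rw [PySem.List.pySetD_of_nonneg _ _ (by omega : (0:Int) ≤ a), hm]
    have hlen' : P'.length = sec.length := by
      rw [hP'eq, List.length_set, hlen]
    have hP'prefix : ∀ k : Nat, (k : Int) < a + 1 → P'.getD k 0 = predVal sec k := by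
      intro k hk
      rw [hP'eq]
      by_cases hke : k = a.toNat
      · subst hke
        rw [List.getD_eq_getElem?_getD, List.getElem?_set_self (by omega), Option.getD_some]
      · rw [List.getD_eq_getElem?_getD, List.getElem?_set_ne (by omega), ← List.getD_eq_getElem?_getD]
        exact hP k (by omega)
    intro k hk
    have := pred_fold sec (a + 1) P' hlen' (by omega) hP'prefix k hk
    rw [this]
    by_cases h1 : (k : Int) < a
    · rw [if_pos (by omega), if_pos h1]
      rw [hP'eq, List.getD_eq_getElem?_getD, List.getElem?_set_ne (by omega), ← List.getD_eq_getElem?_getD]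
    · by_cases h2 : (k : Int) < a + 1
      · rw [if_pos h2, if_neg h1]
        rw [hP'eq]
        have hke : k = a.toNat := by omega
        subst hke
        rw [List.getD_eq_getElem?_getD, List.getElem?_set_self (by omega), Option.getD_some]
      · rw [if_neg h2, if_neg h1]
termination_by ((sec.length : Int) - a).toNat
decreasing_by omega

theorem succ_fold (sec : List Int) (b : Int) (S : List Int)
    (hlen : S.length = sec.length) (hb : b ≤ -2)
    (hS : ∀ k : Nat, k < sec.length → (sec.length : Int) + b < k → S.getD k 0 = succVal sec k) :
    ∀ k : Nat, k < sec.length →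
      ((PySem.List.pyRange b (-((sec.length : Int) + 1)) (-1)).foldl
        (fun succ i =>
          if PySem.List.pyGetD sec (i + 1) 0 ≥ PySem.List.pyGetD sec i 0 then
            PySem.List.pySetD succ i (PySem.List.pyGetD succ (i + 1) 0 + 1)
          else
            PySem.List.pySetD succ i 0) S).getD k 0
        = if (sec.length : Int) + b < k then S.getD k 0 else succVal sec k := by
  by_cases hcase : b ≤ -((sec.length : Int) + 1)
  · rw [PySem.List.pyRange_neg_one_eq_nil hcase]
    intro k hk
    rw [List.foldl_nil, if_pos (by omega)]
  · push Not at hcase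
    rw [PySem.List.pyRange_neg_one_cons hcase, List.foldl_cons]
    set p : Nat := ((sec.length : Int) + b).toNat with hpdef
    have hp1 : p + 1 < sec.length := by omega
    have hgb : PySem.List.pyGetD sec b 0 = sec.getD p 0 := by
      rw [pyGetD_neg' sec b 0 (by omega) (by omega)]
    have hgb1 : PySem.List.pyGetD sec (b + 1) 0 = sec.getD (p + 1) 0 := by
      rw [pyGetD_neg' sec (b + 1) 0 (by omega) (by omega),
        show ((sec.length : Int) + (b + 1)).toNat = p + 1 by omega]
    have hgS1 : PySem.List.pyGetD S (b + 1) 0 = succVal sec (p + 1) := by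
      rw [pyGetD_neg' S (b + 1) 0 (by omega) (by omega), hlen,
        show ((sec.length : Int) + (b + 1)).toNat = p + 1 by omega]
      exact hS (p + 1) (by omega) (by omega)
    set S' : List Int :=
      (if PySem.List.pyGetD sec (b + 1) 0 ≥ PySem.List.pyGetD sec b 0 then
        PySem.List.pySetD S b (PySem.List.pyGetD S (b + 1) 0 + 1)
      else
        PySem.List.pySetD S b 0) with hS'def
    have hS'eq : S' = S.set p (succVal sec p) := by
      rw [hS'def, hgb, hgb1, hgS1]
      conv_rhs => rw [succVal]
      rw [dif_pos hp1]
      split_ifs with h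
      · rw [pySetD_neg' S b _ (by omega) (by omega), hlen]
      · rw [pySetD_neg' S b _ (by omega) (by omega), hlen]
    have hlen' : S'.length = sec.length := by
      rw [hS'eq, List.length_set, hlen]
    have hS'inv : ∀ k : Nat, k < sec.length → (sec.length : Int) + (b - 1) < k →
        S'.getD k 0 = succVal sec k := by
      intro k hk1 hk2
      rw [hS'eq]
      by_cases hke : k = p
      · subst hke
        rw [List.getD_eq_getElem?_getD, List.getElem?_set_self (by omega), Option.getD_some]
      · rw [List.getD_eq_getElem?_getD, List.getElem?_set_ne (by omega), ← List.getD_eq_getElem?_getD]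
        exact hS k hk1 (by omega)
    intro k hk
    have := succ_fold sec (b - 1) S' hlen' (by omega) hS'inv k hk
    rw [this]
    by_cases h1 : (sec.length : Int) + b < k
    · rw [if_pos (by omega), if_pos h1]
      rw [hS'eq, List.getD_eq_getElem?_getD, List.getElem?_set_ne (by omega), ← List.getD_eq_getElem?_getD]
    · by_cases h2 : (sec.length : Int) + (b - 1) < k
      · rw [if_pos h2, if_neg h1]
        rw [hS'eq]
        have hke : k = p := by omega
        subst hke
        rw [List.getD_eq_getElem?_getD, List.getElem?_set_self (by omega), Option.getD_some]
      · rw [if_neg h2, if_neg h1]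
termination_by (b + (sec.length : Int) + 1).toNat
decreasing_by omega

theorem cond_iff (sec : List Int) (time i : Int) (hne : time ≠ 0) (h0 : 0 ≤ i)
    (hn : i < (sec.length : Int)) :
    (predVal sec i.toNat ≥ time ∧ succVal sec i.toNat ≥ time) ↔
      solutionAltOk sec (sec.length : Int) time i = true := by
  rw [solutionAltOk]
  simp only [Bool.and_eq_true, decide_eq_true_eq, List.all_eq_true, PySem.List.mem_pyRange_one,
    ge_iff_le]
  rcases lt_or_gt_of_ne hne with hneg | hpos
  · -- time < 0 : both sides hold
    constructor
    · rintro -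
      refine ⟨⟨⟨by omega, by omega⟩, ?_⟩, ?_⟩
      · intro j hj; omega
      · intro j hj; omega
    · rintro -
      exact ⟨le_trans (by omega) (predVal_nonneg sec i.toNat),
             le_trans (by omega) (succVal_nonneg sec i.toNat)⟩
  · -- time > 0
    set t : Nat := time.toNat with htdef
    have ht : (t : Int) = time := by omega
    have hiN : i.toNat < sec.length := by omega
    rw [← ht, predVal_ge sec t i.toNat, succVal_ge sec t i.toNat hiN]
    constructor
    · rintro ⟨⟨hp1, hp2⟩, hs1, hs2⟩
      refine ⟨⟨⟨by omega, by omega⟩, ?_⟩, ?_⟩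
      · rintro j ⟨hj1, hj2⟩
        rw [PySem.List.pyGetD_of_nonneg sec 0 (by omega : (0:Int) ≤ j - 1),
          PySem.List.pyGetD_of_nonneg sec 0 (by omega : (0:Int) ≤ j)]
        have hk : (i - j).toNat < t := by omega
        have := hp2 (i - j).toNat hk
        have e2 : i.toNat - (i - j).toNat - 1 = (j - 1).toNat := by omega
        have e1 : i.toNat - (i - j).toNat = j.toNat := by omega
        rw [e2, e1] at this
        exact this
      · rintro j ⟨hj1, hj2⟩
        rw [PySem.List.pyGetD_of_nonneg sec 0 (by omega : (0:Int) ≤ j),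
          PySem.List.pyGetD_of_nonneg sec 0 (by omega : (0:Int) ≤ j + 1)]
        have hk : (j - i).toNat < t := by omega
        have := hs2 (j - i).toNat hk
        have e2 : i.toNat + (j - i).toNat + 1 = (j + 1).toNat := by omega
        have e1 : i.toNat + (j - i).toNat = j.toNat := by omega
        rw [e2, e1] at this
        exact this
    · rintro ⟨⟨⟨hb1, hb2⟩, hwin1⟩, hwin2⟩
      refine ⟨⟨by omega, ?_⟩, by omega, ?_⟩
      · intro k hk
        have := hwin1 (i - k) ⟨by omega, by omega⟩
        rw [PySem.List.pyGetD_of_nonneg sec 0 (by omega : (0:Int) ≤ i - k - 1),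
          PySem.List.pyGetD_of_nonneg sec 0 (by omega : (0:Int) ≤ i - k)] at this
        have e1 : (i - (k:Int)).toNat = i.toNat - k := by omega
        have e2 : (i - (k:Int) - 1).toNat = i.toNat - k - 1 := by omega
        rw [e1, e2] at this
        exact this
      · intro k hk
        have := hwin2 (i + k) ⟨by omega, by omega⟩
        rw [PySem.List.pyGetD_of_nonneg sec 0 (by omega : (0:Int) ≤ i + k),
          PySem.List.pyGetD_of_nonneg sec 0 (by omega : (0:Int) ≤ i + k + 1)] at this
        have e1 : (i + (k:Int)).toNat = i.toNat + k := by omega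
        have e2 : (i + (k:Int) + 1).toNat = i.toNat + k + 1 := by omega
        rw [e1, e2] at this
        exact this

-- ===== VERDICT (by name: the statement is the Claim_ definition above) =====
theorem solution_spec : Claim_equal_solution := by
  intro sec time _
  unfold Spec_solution solution solution_alt
  by_cases h0 : time = 0
  · rw [if_pos h0, h0]
    symm
    rw [List.filter_eq_self]
    intro i hi
    rw [PySem.List.mem_pyRange_one] at hi
    rw [solutionAltOk]
    simp only [Bool.and_eq_true, decide_eq_true_eq, List.all_eq_true, PySem.List.mem_pyRange_one]
    refine ⟨⟨⟨by omega, by omega⟩, ?_⟩, ?_⟩ <;> intro j hj <;> omega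
  · rw [if_neg h0]
    dsimp only
    rw [PySem.List.foldl_append_ite_eq_filter, List.nil_append]
    apply List.filter_congr
    intro i hi
    rw [PySem.List.mem_pyRange_one] at hi
    have hrep : ∀ k : Nat, (List.replicate sec.length (0:Int)).getD k 0 = 0 := by
      intro k
      simp [List.getD_eq_getElem?_getD, List.getElem?_replicate]
      split_ifs <;> rfl
    have hp : PySem.List.pyGetD
        ((PySem.List.pyRange 1 (sec.length : Int) 1).foldl
          (fun pred i =>
            if PySem.List.pyGetD sec (i - 1) 0 ≥ PySem.List.pyGetD sec i 0 then
              PySem.List.pySetD pred i (PySem.List.pyGetD pred (i - 1) 0 + 1)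
            else
              PySem.List.pySetD pred i 0) (List.replicate sec.length 0)) i 0
        = predVal sec i.toNat := by
      rw [PySem.List.pyGetD_of_nonneg _ 0 hi.1]
      rw [pred_fold sec 1 (List.replicate sec.length 0) (by simp) le_rfl
        (by intro k hk; rw [hrep k, show k = 0 by omega]; rfl) i.toNat (by omega)]
      split_ifs with h
      · rw [hrep, show i.toNat = 0 by omega]; rfl
      · rfl
    have hs : PySem.List.pyGetD
        ((PySem.List.pyRange (-2) (-((sec.length : Int) + 1)) (-1)).foldl
          (fun succ i =>
            if PySem.List.pyGetD sec (i + 1) 0 ≥ PySem.List.pyGetD sec i 0 then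
              PySem.List.pySetD succ i (PySem.List.pyGetD succ (i + 1) 0 + 1)
            else
              PySem.List.pySetD succ i 0) (List.replicate sec.length 0)) i 0
        = succVal sec i.toNat := by
      rw [PySem.List.pyGetD_of_nonneg _ 0 hi.1]
      rw [succ_fold sec (-2) (List.replicate sec.length 0) (by simp) le_rfl
        (by
          intro k hk1 hk2
          rw [hrep k, succVal, dif_neg (by omega)]) i.toNat (by omega)]
      split_ifs with h
      · rw [hrep, succVal, dif_neg (by omega)]
      · rfl
    rw [hp, hs]
    rcases Bool.eq_false_or_eq_true (solutionAltOk sec (sec.length : Int) time i) with hb | hb <;>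
      rw [hb]
    · rw [decide_eq_true_eq]
      exact (cond_iff sec time i h0 hi.1 hi.2).mpr hb
    · rw [decide_eq_false_iff_not]
      intro hx
      have := (cond_iff sec time i h0 hi.1 hi.2).mp hx
      rw [hb] at this
      cases this
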